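-- pv_equiv track=rewrite | github.com/robert1948/autorisen | scripts/fix_markdown_lint.py | fix_multiple_h1_headers
-- ===== SOURCE A (Python) =====
-- def fix_multiple_h1_headers(content):
--     """Convert multiple H1 headers to H2 after the first one."""
--     lines = content.split("\n")
--     fixed_lines = []
--     h1_count = 0
--
--     for line in lines:
--         if line.startswith("# "):
--             h1_count += 1
--             if h1_count > 1:
--                 line = "##" + line[1:]  # Convert H1 to H2
--         fixed_lines.append(line)
--
--     return "\n".join(fixed_lines)
-- ===== SOURCE B (Python) =====
-- def fix_multiple_h1_headers(content):
--     """Convert multiple H1 headers to H2 after the first one."""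
--     lines = content.split("\n")
--     first = next((i for i, l in enumerate(lines) if l.startswith("# ")), len(lines))
--     head, tail = lines[:first + 1], lines[first + 1:]
--     return "\n".join(head + ["##" + l[1:] if l.startswith("# ") else l for l in tail])
-- ===== Notes on version B (the rewrite author's own statement) =====
-- stated objective: alternative
-- what changed: Replaces the single pass with a running H1 counter by a two-phase locate-then-split: find the index of the first H1 line, keep everything up to and including it verbatim, and demote every H1 line in the remaining suffix.
import Mathlib
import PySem

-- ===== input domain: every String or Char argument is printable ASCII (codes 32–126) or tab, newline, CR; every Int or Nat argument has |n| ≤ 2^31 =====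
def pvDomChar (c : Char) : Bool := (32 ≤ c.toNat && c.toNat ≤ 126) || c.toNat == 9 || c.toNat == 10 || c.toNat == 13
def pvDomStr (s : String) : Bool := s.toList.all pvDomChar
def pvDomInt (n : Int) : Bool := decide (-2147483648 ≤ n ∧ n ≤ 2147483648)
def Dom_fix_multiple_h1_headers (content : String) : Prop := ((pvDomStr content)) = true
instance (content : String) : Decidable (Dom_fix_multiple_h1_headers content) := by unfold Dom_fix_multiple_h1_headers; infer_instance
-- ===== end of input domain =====

-- B replaces A's single pass with a running H1 counter by a locate-then-split decomposition (objective: alternative).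

-- ===== PORT A =====
-- A's loop body: count H1 lines, demote when the count exceeds 1.
def pvStepA (st : List (List Char) × Nat) (line : List Char) : List (List Char) × Nat :=
  if PySem.Chars.startswith line ['#', ' '] then
    let c := st.2 + 1
    let line' := if c > 1 then ['#', '#'] ++ PySem.Chars.slice line (some 1) none else line
    (st.1 ++ [line'], c)
  else (st.1 ++ [line], st.2)

-- A, transliterated on the List Char side: split on '\n', fold with (fixed_lines, h1_count), join.
def fix_multiple_h1_headers (content : String) : String :=
  let lines := PySem.Chars.splitOn content.toList ['\n']
  let st := lines.foldl pvStepA ([], 0)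
  String.mk (PySem.Chars.join ['\n'] st.1)

-- ===== PORT B =====
-- B: index of the first H1 line (len(lines) if none), keep lines[:first+1], demote H1 lines in lines[first+1:].
def fix_multiple_h1_headers_alt (content : String) : String :=
  let lines := PySem.Chars.splitOn content.toList ['\n']
  let first := (lines.findIdx? (fun l => PySem.Chars.startswith l ['#', ' '])).getD lines.length
  let head := PySem.List.slice lines none (some ((first : Int) + 1))
  let tail := PySem.List.slice lines (some ((first : Int) + 1)) none
  String.mk (PySem.Chars.join ['\n']
    (head ++ tail.map (fun l =>
      if PySem.Chars.startswith l ['#', ' '] then ['#', '#'] ++ PySem.Chars.slice l (some 1) none else l)))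

-- ===== PRECONDITION & SPEC =====
def Spec_fix_multiple_h1_headers (content : String) (out : String) : Prop := out = fix_multiple_h1_headers_alt content
instance (content : String) (out : String) : Decidable (Spec_fix_multiple_h1_headers content out) := by unfold Spec_fix_multiple_h1_headers; infer_instance

-- ===== CLAIM (what is proved, stated in full; the proofs are below) =====
def Claim_equal_fix_multiple_h1_headers : Prop := ∀ (content : String), Dom_fix_multiple_h1_headers content → Spec_fix_multiple_h1_headers content (fix_multiple_h1_headers content)

-- ===== LEMMAS AND PROOFS =====

-- the line predicate and the demotion, as both ports compute them
def pvP (l : List Char) : Bool := PySem.Chars.startswith l ['#', ' ']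
def pvDem (l : List Char) : List Char := ['#', '#'] ++ PySem.Chars.slice l (some 1) none

-- common specification: demote every H1 line once one has been seen
def pvSpec : List (List Char) → Bool → List (List Char)
  | [], _ => []
  | l :: ls, seen =>
      if pvP l then (if seen then pvDem l else l) :: pvSpec ls true
      else l :: pvSpec ls seen

lemma foldA_eq (ls : List (List Char)) : ∀ (acc : List (List Char)) (c : Nat),
    (ls.foldl pvStepA (acc, c)).1 = acc ++ pvSpec ls (c != 0) := by
  induction ls with
  | nil => intro acc c; simp [pvSpec]
  | cons l ls ih =>
    intro acc c
    rw [List.foldl_cons]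
    by_cases hp : PySem.Chars.startswith l ['#', ' ']
    · have hstep : pvStepA (acc, c) l =
          (acc ++ [if c + 1 > 1 then pvDem l else l], c + 1) := by
        simp [pvStepA, pvDem, hp]
      rw [hstep, ih]
      rcases Nat.eq_zero_or_pos c with h0 | h0
      · subst h0; simp [pvSpec, pvP, hp]
      · have hgt : c + 1 > 1 := by omega
        have hcne : (c != 0) = true := by simpa using Nat.pos_iff_ne_zero.mp h0
        simp [pvSpec, pvP, hp, hgt, hcne]
    · have hstep : pvStepA (acc, c) l = (acc ++ [l], c) := by
        simp [pvStepA, hp]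
      rw [hstep, ih]
      simp [pvSpec, pvP, hp]

lemma pvSpec_of_none (ls : List (List Char)) (b : Bool) (h : ∀ l ∈ ls, pvP l = false) :
    pvSpec ls b = ls := by
  induction ls generalizing b with
  | nil => rfl
  | cons l ls ih =>
    have hl : pvP l = false := h l (List.mem_cons_self ..)
    simp [pvSpec, hl, ih b (fun x hx => h x (List.mem_cons_of_mem _ hx))]

lemma pvSpec_true (ls : List (List Char)) :
    pvSpec ls true = ls.map (fun l => if pvP l then pvDem l else l) := by
  induction ls with
  | nil => rfl
  | cons l ls ih => by_cases hp : pvP l <;> simp [pvSpec, hp, ih]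

lemma pvSpec_append (pre rest : List (List Char)) (h : ∀ l ∈ pre, pvP l = false) :
    pvSpec (pre ++ rest) false = pre ++ pvSpec rest false := by
  induction pre with
  | nil => rfl
  | cons l pre ih =>
    have hl : pvP l = false := h l (List.mem_cons_self ..)
    simp [pvSpec, hl, ih (fun x hx => h x (List.mem_cons_of_mem _ hx))]

lemma main_list (lines : List (List Char)) :
    pvSpec lines false =
      PySem.List.slice lines none (some ((((lines.findIdx? pvP).getD lines.length : Nat) : Int) + 1)) ++
      (PySem.List.slice lines (some ((((lines.findIdx? pvP).getD lines.length : Nat) : Int) + 1)) none).map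
        (fun l => if pvP l then pvDem l else l) := by
  cases h : lines.findIdx? pvP with
  | none =>
    have hno : ∀ l ∈ lines, pvP l = false := by
      simpa using List.findIdx?_eq_none_iff.mp h
    have h1 : (((lines.length : Nat) : Int) + 1) = ((lines.length + 1 : Nat) : Int) := by
      push_cast; ring
    rw [pvSpec_of_none lines false hno, Option.getD_none, h1,
      PySem.List.slice_to_natCast, PySem.List.slice_from_natCast,
      List.take_of_length_le (Nat.le_succ _), List.drop_eq_nil_of_le (Nat.le_succ _)]
    simp
  | some j =>
    obtain ⟨hj, hpj, hlt⟩ := List.findIdx?_eq_some_iff_getElem.mp h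
    have h1 : (((j : Nat) : Int) + 1) = ((j + 1 : Nat) : Int) := by push_cast; ring
    have hdecomp : lines = lines.take j ++ lines[j] :: lines.drop (j + 1) := by
      conv_lhs => rw [← List.take_append_drop j lines]
      rw [List.drop_eq_getElem_cons hj]
    have hpre : ∀ l ∈ lines.take j, pvP l = false := by
      intro l hl
      obtain ⟨i, hi, rfl⟩ := List.mem_iff_getElem.mp hl
      have hij : i < j := lt_of_lt_of_le hi (by simpa using List.length_take_le j lines)
      simpa [List.getElem_take] using hlt i hij
    have htake : lines.take (j + 1) = lines.take j ++ [lines[j]] := by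
      rw [List.take_add_one]
      simp [List.getElem?_eq_getElem hj]
    calc pvSpec lines false
        = pvSpec (lines.take j ++ lines[j] :: lines.drop (j + 1)) false := by rw [← hdecomp]
      _ = lines.take j ++ pvSpec (lines[j] :: lines.drop (j + 1)) false := pvSpec_append _ _ hpre
      _ = lines.take j ++ lines[j] :: pvSpec (lines.drop (j + 1)) true := by
            simp [pvSpec, hpj]
      _ = lines.take j ++ lines[j] :: (lines.drop (j + 1)).map (fun l => if pvP l then pvDem l else l) := by
            rw [pvSpec_true]
      _ = _ := by
            rw [Option.getD_some, h1, PySem.List.slice_to_natCast, PySem.List.slice_from_natCast,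
              htake, List.append_assoc, List.singleton_append]

-- ===== VERDICT (by name: the statement is the Claim_ definition above) =====
theorem fix_multiple_h1_headers_spec : Claim_equal_fix_multiple_h1_headers := by
  intro content _
  unfold Spec_fix_multiple_h1_headers fix_multiple_h1_headers fix_multiple_h1_headers_alt
  have hf := foldA_eq (PySem.Chars.splitOn content.toList ['\n']) [] 0
  rw [show ((0 : Nat) != 0) = false from rfl, List.nil_append] at hf
  show String.mk (PySem.Chars.join ['\n']
      (List.foldl pvStepA ([], 0) (PySem.Chars.splitOn content.toList ['\n'])).1) = _
  rw [hf, main_list (PySem.Chars.splitOn content.toList ['\n'])]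
  rfl
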